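-- pv_equiv track=rewrite | github.com/richielo/depression_classifiers | text_features_extractor.py | getStemWordCat
-- ===== SOURCE A (Python) =====
-- def getStemWordCat(catDict, stemWordDict, word):
--     catNames = []
--     for key in stemWordDict.keys():
--         if word.startswith(key):
--             categories = stemWordDict[key]
--             for cat in categories:
--                 catNames.append(catDict[cat.replace('\n', '')])
--     return catNames
-- ===== SOURCE B (Python) =====
-- def getStemWordCat(catDict, stemWordDict, word):
--     # walk the prefixes of word (capped at the longest key) through a key->insertion-index
--     # map instead of testing every key with startswith; sort the hits by that index to
--     # keep A's insertion-order output
--     pos = {k: i for i, k in enumerate(stemWordDict)}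
--     m = min(len(word), max(map(len, stemWordDict), default=-1))
--     hits = []
--     for i in range(m + 1):
--         p = word[:i]
--         if p in pos:
--             hits.append((pos[p], p))
--     hits.sort(key=lambda t: t[0])
--     out = []
--     for _, p in hits:
--         for cat in stemWordDict[p]:
--             out.append(catDict[cat.replace('\n', '')])
--     return out
-- ===== Notes on version B (the rewrite author's own statement) =====
-- stated objective: alternative
-- what changed: Instead of scanning every dict key and testing word.startswith(key), B builds a key->insertion-index map, walks the prefixes of word (capped at the longest key) looking each up in that map, and sorts the few hits by insertion index to reproduce A's output order.
import Mathlib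
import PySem

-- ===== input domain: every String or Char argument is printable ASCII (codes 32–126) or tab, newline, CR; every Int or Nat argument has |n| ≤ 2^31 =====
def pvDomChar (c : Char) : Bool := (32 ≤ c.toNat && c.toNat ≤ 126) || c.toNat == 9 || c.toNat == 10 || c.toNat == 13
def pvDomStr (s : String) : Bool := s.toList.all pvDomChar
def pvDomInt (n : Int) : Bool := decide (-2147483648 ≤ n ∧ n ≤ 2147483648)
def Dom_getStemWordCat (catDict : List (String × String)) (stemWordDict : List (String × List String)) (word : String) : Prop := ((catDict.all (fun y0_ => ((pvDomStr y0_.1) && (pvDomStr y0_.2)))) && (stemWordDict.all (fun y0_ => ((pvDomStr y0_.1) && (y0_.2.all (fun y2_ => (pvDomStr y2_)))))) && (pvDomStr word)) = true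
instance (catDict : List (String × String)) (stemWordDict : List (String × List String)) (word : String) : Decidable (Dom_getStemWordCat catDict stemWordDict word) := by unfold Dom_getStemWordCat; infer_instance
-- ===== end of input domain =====

-- B walks the prefixes of `word` through a key->insertion-index map instead of testing every key
-- with startswith, then sorts the hits by that index to reproduce A's insertion-order output.


-- ===== PORT A =====
def getStemWordCat (catDict : List (String × String)) (stemWordDict : List (String × List String)) (word : String) : List String :=
  let cd := PySem.Dict.ofList catDict
  let sd := PySem.Dict.ofList stemWordDict
  sd.keys.foldl (fun acc key =>
    if PySem.Str.startswith word key then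
      (sd.getD key []).foldl (fun acc2 cat => acc2 ++ [cd.getD (PySem.Str.replace cat "\n" "") ""]) acc
    else acc) []

def getStemWordCat_alt (catDict : List (String × String)) (stemWordDict : List (String × List String)) (word : String) : List String :=
  let cd := PySem.Dict.ofList catDict
  let sd := PySem.Dict.ofList stemWordDict
  let pos := PySem.Dict.ofList ((PySem.List.enumerate sd.keys).map (fun t => (t.2, t.1)))
  let m := min (PySem.Str.len word) (PySem.List.maxD (sd.keys.map PySem.Str.len) (fun x => x) (-1))
  let hits := (PySem.List.pyRange 0 (m + 1)).foldl (fun acc i =>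
      if pos.contains (PySem.Str.slice word none (some i)) then
        acc ++ [(pos.getD (PySem.Str.slice word none (some i)) 0, PySem.Str.slice word none (some i))]
      else acc) []
  let shits := PySem.List.sorted hits (fun t => t.1)
  shits.foldl (fun acc t =>
    (sd.getD t.2 []).foldl (fun acc2 cat => acc2 ++ [cd.getD (PySem.Str.replace cat "\n" "") ""]) acc) []

-- ===== PRECONDITION & SPEC =====
-- Pre_ excludes exactly the inputs where the Python A raises KeyError: some category string of a
-- matched stem key, with newlines removed, is absent from catDict.
def Pre_getStemWordCat (catDict : List (String × String)) (stemWordDict : List (String × List String)) (word : String) : Prop :=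
  ∀ p ∈ stemWordDict, PySem.Str.startswith word p.1 = true →
    ∀ c ∈ p.2, PySem.Str.replace c "\n" "" ∈ catDict.map Prod.fst
instance (catDict : List (String × String)) (stemWordDict : List (String × List String)) (word : String) : Decidable (Pre_getStemWordCat catDict stemWordDict word) := by unfold Pre_getStemWordCat; infer_instance
def pvWitness_getStemWordCat : (List (String × String)) × (List (String × List String)) × String :=
  ([("x", "CAT")], [("ab", ["x"])], "abc")

def Spec_getStemWordCat (catDict : List (String × String)) (stemWordDict : List (String × List String)) (word : String) (out : List String) : Prop := out = getStemWordCat_alt catDict stemWordDict word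
instance (catDict : List (String × String)) (stemWordDict : List (String × List String)) (word : String) (out : List String) : Decidable (Spec_getStemWordCat catDict stemWordDict word out) := by unfold Spec_getStemWordCat; infer_instance

-- ===== CLAIM (what is proved, stated in full; the proofs are below) =====
def Claim_equal_getStemWordCat : Prop := ∀ (catDict : List (String × String)) (stemWordDict : List (String × List String)) (word : String), Dom_getStemWordCat catDict stemWordDict word → Pre_getStemWordCat catDict stemWordDict word → Spec_getStemWordCat catDict stemWordDict word (getStemWordCat catDict stemWordDict word)

-- ===== LEMMAS AND PROOFS =====
def pvPrefix (word : String) (i : Int) : String := PySem.Str.slice word none (some i)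

-- pos dict facts
theorem pos_items {ks : List String} (hnd : ks.Nodup) :
    (PySem.Dict.ofList ((PySem.List.enumerate ks).map (fun t => (t.2, t.1)))).items
      = (PySem.List.enumerate ks).map (fun t => (t.2, t.1)) := by
  have h := PySem.Dict.items_foldl_insert_fresh
    ((PySem.List.enumerate ks).map (fun t => (t.2, t.1))) Prod.fst Prod.snd PySem.Dict.empty
    (by intro a _; simp [PySem.Dict.contains_empty])
    (by simpa [List.map_map, Function.comp_def, PySem.List.map_snd_enumerate] using hnd)
  simpa [PySem.Dict.ofList, PySem.Dict.update, PySem.Dict.empty] using h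

theorem pos_keys {ks : List String} (hnd : ks.Nodup) :
    (PySem.Dict.ofList ((PySem.List.enumerate ks).map (fun t => (t.2, t.1)))).keys = ks := by
  show ((PySem.Dict.ofList ((PySem.List.enumerate ks).map (fun t => (t.2, t.1)))).items).map Prod.fst = ks
  rw [pos_items hnd]
  simp [List.map_map, Function.comp_def, PySem.List.map_snd_enumerate]

theorem pos_contains {ks : List String} (hnd : ks.Nodup) (q : String) :
    (PySem.Dict.ofList ((PySem.List.enumerate ks).map (fun t => (t.2, t.1)))).contains q = true ↔ q ∈ ks := by
  rw [PySem.Dict.contains_iff_mem_keys, pos_keys hnd]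

theorem pos_getD {ks : List String} (hnd : ks.Nodup) {t : Int × String}
    (ht : t ∈ PySem.List.enumerate ks) :
    (PySem.Dict.ofList ((PySem.List.enumerate ks).map (fun t => (t.2, t.1)))).getD t.2 0 = t.1 := by
  apply PySem.Dict.getD_of_mem_items
  · rw [pos_items hnd]
    exact List.mem_map_of_mem ht
  · show ((PySem.Dict.ofList _).items.map Prod.fst).Nodup
    rw [pos_items hnd]
    simpa [List.map_map, Function.comp_def, PySem.List.map_snd_enumerate] using hnd

theorem pre_toList (word : String) {i : Int} (h : 0 ≤ i) :
    (pvPrefix word i).toList = word.toList.take i.toNat := by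
  show (PySem.Str.slice word none (some i)).toList = _
  rw [PySem.Str.toList_slice]
  exact PySem.List.slice_to word.toList h

theorem sw_iff (word k : String) :
    PySem.Str.startswith word k = true ↔ k.toList <+: word.toList := by
  rw [PySem.Str.startswith_eq]
  exact PySem.Chars.startswith_iff _ _

theorem R_nodup (b : Int) : (PySem.List.pyRange 0 b).Nodup := by
  by_cases hb : 0 ≤ b
  · have : b = ((b.toNat : Nat) : Int) := by omega
    rw [this, PySem.List.pyRange_zero_natCast]
    exact List.nodup_range.map (fun a b h => by exact_mod_cast h)
  · have : PySem.List.pyRange 0 b = [] := by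
      rw [List.eq_nil_iff_forall_not_mem]
      intro i hi
      rw [PySem.List.mem_pyRange_one] at hi
      omega
    rw [this]; exact List.nodup_nil

theorem mem_R_iff (word : String) (m i : Int) :
    i ∈ PySem.List.pyRange 0 (min (PySem.Str.len word) m + 1)
      ↔ 0 ≤ i ∧ i.toNat ≤ word.toList.length ∧ i ≤ m := by
  rw [PySem.List.mem_pyRange_one, PySem.Str.len_eq]
  omega

theorem mem_hits_iff (word : String) {ks : List String} (hnd : ks.Nodup) {m : Int}
    (hm : ∀ k ∈ ks, PySem.Str.len k ≤ m) (t : Int × String) :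
    t ∈ ((PySem.List.pyRange 0 (min (PySem.Str.len word) m + 1)).filter
          (fun i => (PySem.Dict.ofList ((PySem.List.enumerate ks).map (fun t => (t.2, t.1)))).contains (pvPrefix word i))).map
          (fun i => ((PySem.Dict.ofList ((PySem.List.enumerate ks).map (fun t => (t.2, t.1)))).getD (pvPrefix word i) 0, pvPrefix word i))
      ↔ t ∈ (PySem.List.enumerate ks).filter (fun e => PySem.Str.startswith word e.2) := by
  constructor
  · intro ht
    rcases List.mem_map.1 ht with ⟨i, hi, rfl⟩
    rcases List.mem_filter.1 hi with ⟨hiR, hcon⟩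
    have hmem : pvPrefix word i ∈ ks := (pos_contains hnd _).1 hcon
    rcases (mem_R_iff word m i).1 hiR with ⟨h0, hle, _⟩
    rcases List.mem_iff_getElem.1 hmem with ⟨k, hk, hek⟩
    have he : ((k : Int), pvPrefix word i) ∈ PySem.List.enumerate ks := by
      rw [PySem.List.mem_enumerate_iff]
      exact ⟨k, hk, by simp [hek]⟩
    have hgd := pos_getD hnd he
    simp only at hgd
    rw [List.mem_filter]
    refine ⟨by rw [hgd]; exact he, ?_⟩
    have : (pvPrefix word i).toList <+: word.toList := by
      rw [pre_toList word h0]; exact List.take_prefix _ _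
    simpa using (sw_iff word (pvPrefix word i)).2 this
  · intro ht
    rcases List.mem_filter.1 ht with ⟨he, hsw⟩
    have hpre : t.2.toList <+: word.toList := (sw_iff word t.2).1 (by simpa using hsw)
    have hmem : t.2 ∈ ks := by
      rcases (PySem.List.mem_enumerate_iff ks 0 t).1 he with ⟨k, hk, hek⟩
      rw [hek]; exact List.getElem_mem hk
    set i : Int := (t.2.toList.length : Int) with hi
    have h0 : 0 ≤ i := by positivity
    have hpe : pvPrefix word i = t.2 := by
      apply String.toList_inj.1
      rw [pre_toList word h0, hi, Int.toNat_natCast]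
      exact (List.prefix_iff_eq_take.1 hpre).symm
    have hiR : i ∈ PySem.List.pyRange 0 (min (PySem.Str.len word) m + 1) := by
      rw [mem_R_iff]
      refine ⟨h0, by simpa [hi] using hpre.length_le, ?_⟩
      have := hm t.2 hmem
      rw [PySem.Str.len_eq] at this
      omega
    apply List.mem_map.2
    refine ⟨i, List.mem_filter.2 ⟨hiR, ?_⟩, ?_⟩
    · rw [hpe]; exact (pos_contains hnd _).2 hmem
    · have := pos_getD hnd he
      rw [hpe, this]

theorem ys_pairwise (word : String) (ks : List String) :
    ((PySem.List.enumerate ks).filter (fun e => PySem.Str.startswith word e.2)).Pairwise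
      (fun a b => a.1 < b.1) :=
  (PySem.List.pairwise_lt_enumerate ks 0).filter _

theorem ys_nodup (word : String) (ks : List String) :
    ((PySem.List.enumerate ks).filter (fun e => PySem.Str.startswith word e.2)).Nodup :=
  ((ys_pairwise word ks).imp (fun h => by intro he; rw [he] at h; exact lt_irrefl _ h))

theorem hits_nodup (word : String) (ks : List String) (m : Int) :
    (((PySem.List.pyRange 0 (min (PySem.Str.len word) m + 1)).filter
          (fun i => (PySem.Dict.ofList ((PySem.List.enumerate ks).map (fun t => (t.2, t.1)))).contains (pvPrefix word i))).map
          (fun i => ((PySem.Dict.ofList ((PySem.List.enumerate ks).map (fun t => (t.2, t.1)))).getD (pvPrefix word i) 0, pvPrefix word i))).Nodup := by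
  apply List.Nodup.map_on _ ((R_nodup _).filter _)
  intro i hi j hj hf
  have hi' := (mem_R_iff word m i).1 (List.mem_filter.1 hi).1
  have hj' := (mem_R_iff word m j).1 (List.mem_filter.1 hj).1
  have hsnd : pvPrefix word i = pvPrefix word j := congrArg Prod.snd hf
  have : (pvPrefix word i).toList = (pvPrefix word j).toList := congrArg String.toList hsnd
  rw [pre_toList word hi'.1, pre_toList word hj'.1] at this
  have := congrArg List.length this
  simp only [List.length_take] at this
  obtain ⟨_, _, _⟩ := hi'
  obtain ⟨_, _, _⟩ := hj'
  omega

theorem sorted_hits (word : String) {ks : List String} (hnd : ks.Nodup) {m : Int}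
    (hm : ∀ k ∈ ks, PySem.Str.len k ≤ m) :
    PySem.List.sorted
      (((PySem.List.pyRange 0 (min (PySem.Str.len word) m + 1)).filter
          (fun i => (PySem.Dict.ofList ((PySem.List.enumerate ks).map (fun t => (t.2, t.1)))).contains (pvPrefix word i))).map
          (fun i => ((PySem.Dict.ofList ((PySem.List.enumerate ks).map (fun t => (t.2, t.1)))).getD (pvPrefix word i) 0, pvPrefix word i)))
      (fun t => t.1)
      = (PySem.List.enumerate ks).filter (fun e => PySem.Str.startswith word e.2) := by
  apply PySem.List.sorted_eq_of_perm_of_pairwise_lt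
  · exact (List.perm_ext_iff_of_nodup (ys_nodup word ks) (hits_nodup word ks m)).2
      (fun t => (mem_hits_iff word hnd hm t).symm)
  · exact ys_pairwise word ks

theorem map_snd_filter_enumerate (p : String → Bool) : ∀ (l : List String) (s : Int),
    (((PySem.List.enumerate l s).filter (fun e => p e.2)).map Prod.snd) = l.filter p
  | [], _ => rfl
  | x :: l, s => by
    show ((((s, x) :: PySem.List.enumerate l (s + 1)).filter (fun e => p e.2)).map Prod.snd) = _
    by_cases hp : p x <;>
      simp only [hp, List.map_cons, List.filter, map_snd_filter_enumerate p l (s + 1)]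

theorem A_eq (catDict : List (String × String)) (stemWordDict : List (String × List String)) (word : String) :
    getStemWordCat catDict stemWordDict word
      = ((PySem.Dict.ofList stemWordDict).keys.filter (fun k => PySem.Str.startswith word k)).flatMap
          (fun k => ((PySem.Dict.ofList stemWordDict).getD k []).map
            (fun cat => (PySem.Dict.ofList catDict).getD (PySem.Str.replace cat "\n" "") "")) := by
  unfold getStemWordCat
  simp only
  rw [show (fun acc key =>
        if PySem.Str.startswith word key = true then
          List.foldl (fun acc2 cat => acc2 ++ [(PySem.Dict.ofList catDict).getD (PySem.Str.replace cat "\n" "") ""]) acc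
            ((PySem.Dict.ofList stemWordDict).getD key [])
        else acc)
      = (fun acc key => if PySem.Str.startswith word key = true then
          acc ++ ((PySem.Dict.ofList stemWordDict).getD key []).map
            (fun cat => (PySem.Dict.ofList catDict).getD (PySem.Str.replace cat "\n" "") "") else acc) from
      funext fun acc => funext fun key => by
        rw [PySem.List.foldl_append_singleton_eq_map]]
  rw [PySem.List.foldl_if_eq_foldl_filter, PySem.List.foldl_append_eq_flatMap, List.nil_append]

theorem B_eq (catDict : List (String × String)) (stemWordDict : List (String × List String)) (word : String) :
    getStemWordCat_alt catDict stemWordDict word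
      = ((PySem.Dict.ofList stemWordDict).keys.filter (fun k => PySem.Str.startswith word k)).flatMap
          (fun k => ((PySem.Dict.ofList stemWordDict).getD k []).map
            (fun cat => (PySem.Dict.ofList catDict).getD (PySem.Str.replace cat "\n" "") "")) := by
  unfold getStemWordCat_alt
  simp only
  have hnd : (PySem.Dict.ofList stemWordDict).keys.Nodup := PySem.Dict.nodup_keys_ofList _
  rw [show (fun (acc : List (Int × String)) (i : Int) =>
      if (PySem.Dict.ofList ((PySem.List.enumerate (PySem.Dict.ofList stemWordDict).keys).map (fun t => (t.2, t.1)))).contains (PySem.Str.slice word none (some i)) then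
        acc ++ [((PySem.Dict.ofList ((PySem.List.enumerate (PySem.Dict.ofList stemWordDict).keys).map (fun t => (t.2, t.1)))).getD (PySem.Str.slice word none (some i)) 0, PySem.Str.slice word none (some i))]
      else acc) = (fun acc i =>
      if (PySem.Dict.ofList ((PySem.List.enumerate (PySem.Dict.ofList stemWordDict).keys).map (fun t => (t.2, t.1)))).contains (pvPrefix word i) then
        acc ++ [((PySem.Dict.ofList ((PySem.List.enumerate (PySem.Dict.ofList stemWordDict).keys).map (fun t => (t.2, t.1)))).getD (pvPrefix word i) 0, pvPrefix word i)]
      else acc) from rfl]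
  rw [PySem.List.foldl_append_if
      (p := fun i => (PySem.Dict.ofList ((PySem.List.enumerate (PySem.Dict.ofList stemWordDict).keys).map (fun t => (t.2, t.1)))).contains (pvPrefix word i))
      (f := fun i => ((PySem.Dict.ofList ((PySem.List.enumerate (PySem.Dict.ofList stemWordDict).keys).map (fun t => (t.2, t.1)))).getD (pvPrefix word i) 0, pvPrefix word i))]
  rw [List.nil_append, sorted_hits word hnd (m := PySem.List.maxD ((PySem.Dict.ofList stemWordDict).keys.map PySem.Str.len) (fun x => x) (-1))
        (fun k hk => PySem.List.le_maxD_id _ (-1) _ (List.mem_map_of_mem hk))]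
  rw [show (fun acc (t : Int × String) =>
        List.foldl (fun acc2 cat => acc2 ++ [(PySem.Dict.ofList catDict).getD (PySem.Str.replace cat "\n" "") ""]) acc
          ((PySem.Dict.ofList stemWordDict).getD t.2 []))
      = (fun acc (t : Int × String) => acc ++ ((PySem.Dict.ofList stemWordDict).getD t.2 []).map
          (fun cat => (PySem.Dict.ofList catDict).getD (PySem.Str.replace cat "\n" "") "")) from
      funext fun acc => funext fun t => by
        rw [PySem.List.foldl_append_singleton_eq_map]]
  rw [PySem.List.foldl_append_eq_flatMap, List.nil_append]
  rw [← List.flatMap_map Prod.snd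
    (fun k => ((PySem.Dict.ofList stemWordDict).getD k []).map
      (fun cat => (PySem.Dict.ofList catDict).getD (PySem.Str.replace cat "\n" "") ""))
    (((PySem.List.enumerate (PySem.Dict.ofList stemWordDict).keys).filter (fun e => PySem.Str.startswith word e.2)))]
  rw [map_snd_filter_enumerate]

theorem pv_main (catDict : List (String × String)) (stemWordDict : List (String × List String)) (word : String) :
    getStemWordCat catDict stemWordDict word = getStemWordCat_alt catDict stemWordDict word := by
  rw [A_eq, B_eq]

-- ===== VERDICT (by name: the statement is the Claim_ definition above) =====
theorem getStemWordCat_spec : Claim_equal_getStemWordCat := by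
  intro catDict stemWordDict word _ _
  unfold Spec_getStemWordCat
  exact pv_main catDict stemWordDict word
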